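-- pv_equiv track=rewrite | github.com/imreyes/DNA_Sequence_check | BindingSitesMismatch.py | ptn
-- ===== SOURCE A (Python) =====
-- def ptn(text):
--     def gtn(char):
--         if char=='A' or char=='a':
--             return 0
--         elif char=='C' or char=='c':
--             return 1
--         elif char=='G' or char=='g':
--             return 2
--         elif char=='T' or char=='t':
--             return 3
--     num=0
--     for char in text:
--         num=num*4+gtn(char)
--     return num
-- ===== SOURCE B (Python) =====
-- def ptn(text):
--     def gtn(char):
--         if char == 'A' or char == 'a':
--             return 0
--         elif char == 'C' or char == 'c':
--             return 1
--         elif char == 'G' or char == 'g':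
--             return 2
--         elif char == 'T' or char == 't':
--             return 3
--     n = len(text)
--     return sum(gtn(c) * 4 ** (n - 1 - i) for i, c in enumerate(text))
-- ===== Notes on version B (the rewrite author's own statement) =====
-- stated objective: alternative
-- what changed: Replaces Horner's running accumulator (num = num*4 + digit) with an explicit place-value sum: sum of gtn(c) * 4**(n-1-i) over enumerate(text).
import Mathlib
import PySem

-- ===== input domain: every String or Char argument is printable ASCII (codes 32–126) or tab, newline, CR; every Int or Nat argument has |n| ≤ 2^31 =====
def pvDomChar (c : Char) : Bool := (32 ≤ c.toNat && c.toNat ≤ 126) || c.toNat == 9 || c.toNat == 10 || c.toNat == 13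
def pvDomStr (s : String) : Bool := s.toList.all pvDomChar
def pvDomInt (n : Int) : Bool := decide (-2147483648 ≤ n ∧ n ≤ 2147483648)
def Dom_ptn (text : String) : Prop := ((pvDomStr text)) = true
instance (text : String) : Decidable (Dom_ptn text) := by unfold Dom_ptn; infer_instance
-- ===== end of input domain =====

-- B replaces A's Horner accumulator by an explicit place-value sum (same O(n) pass, different decomposition).

-- ===== PORT A =====
-- gtn: returns none for a character outside ACGTacgt (Python returns None there)
def gtn (char : Char) : Option Int :=
  if char = 'A' ∨ char = 'a' then some 0
  else if char = 'C' ∨ char = 'c' then some 1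
  else if char = 'G' ∨ char = 'g' then some 2
  else if char = 'T' ∨ char = 't' then some 3
  else none

-- for char in text: num = num*4 + gtn(char)   (none = the TypeError Python raises on None)
def ptn (text : String) : Int :=
  (text.toList.foldl
    (fun st c => match st, gtn c with
      | some num, some d => some (num * 4 + d)
      | _, _ => none)
    (some 0)).getD 0

-- ===== PORT B =====
-- n = len(text); sum(gtn(c) * 4**(n-1-i) for i, c in enumerate(text))
def ptn_alt (text : String) : Int :=
  let n := text.toList.length
  (PySem.List.enumerate text.toList 0).foldl
    (fun acc p => acc + ((gtn p.2).getD 0) * (4 : Int) ^ (n - 1 - p.1.toNat)) 0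

-- ===== PRECONDITION & SPEC =====
-- Pre_ excludes exactly the strings with a character outside ACGTacgt, on which
-- Python A raises TypeError (None in arithmetic); B raises there too.
def pvIsBase (c : Char) : Bool :=
  c == 'A' || c == 'a' || c == 'C' || c == 'c' || c == 'G' || c == 'g' || c == 'T' || c == 't'
def Pre_ptn (text : String) : Prop := (text.toList.all pvIsBase) = true
instance (text : String) : Decidable (Pre_ptn text) := by unfold Pre_ptn; infer_instance

def pvWitness_ptn : String := "ACGT"

def Spec_ptn (text : String) (out : Int) : Prop := out = ptn_alt text
instance (text : String) (out : Int) : Decidable (Spec_ptn text out) := by unfold Spec_ptn; infer_instance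

-- ===== CLAIM (what is proved, stated in full; the proofs are below) =====
def Claim_equal_ptn : Prop := ∀ (text : String), Dom_ptn text → Pre_ptn text → Spec_ptn text (ptn text)

-- ===== LEMMAS AND PROOFS =====

-- digit value of a valid char
def dval (c : Char) : Int := (gtn c).getD 0

-- recursive place-value sum used as the meeting point of the two proofs
def pvVal : List Char → Int
  | [] => 0
  | c :: t => dval c * (4 : Int) ^ t.length + pvVal t

lemma gtn_isSome_of_mem (c : Char) (h : pvIsBase c = true) : (gtn c).isSome := by
  simp only [pvIsBase, Bool.or_eq_true, beq_iff_eq] at h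
  rcases h with ((((((h | h) | h) | h) | h) | h) | h) | h <;> subst h <;> decide

-- A's fold from `some m` equals `some (m * 4^len + pvVal l)` on valid input
lemma ptn_fold_eq (l : List Char)
    (hv : ∀ c ∈ l, pvIsBase c = true) :
    ∀ m : Int,
      l.foldl (fun st c => match st, gtn c with
        | some num, some d => some (num * 4 + d)
        | _, _ => none) (some m)
      = some (m * (4 : Int) ^ l.length + pvVal l) := by
  induction l with
  | nil => intro m; simp [pvVal]
  | cons c t ih =>
    intro m
    have hc := gtn_isSome_of_mem c (hv c (List.mem_cons_self ..))
    obtain ⟨d, hd⟩ := Option.isSome_iff_exists.mp hc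
    have ht : ∀ x ∈ t, pvIsBase x = true :=
      fun x hx => hv x (List.mem_cons_of_mem _ hx)
    simp only [List.foldl_cons, ih ht (m * 4 + d), pvVal, List.length_cons, dval, hd,
      Option.getD_some, pow_succ]
    ring_nf

-- B's enumerate sum, generalized over start index and accumulator
lemma ptn_alt_fold_eq (n : Nat) : ∀ (t : List Char) (s : Nat) (acc : Int),
    s + t.length = n →
    (PySem.List.enumerate t (s : Int)).foldl
      (fun acc p => acc + ((gtn p.2).getD 0) * (4 : Int) ^ (n - 1 - p.1.toNat)) acc
    = acc + pvVal t := by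
  intro t
  induction t with
  | nil => intro s acc _; simp [PySem.List.enumerate_nil, pvVal]
  | cons c t ih =>
    intro s acc hn
    rw [PySem.List.enumerate_cons]
    have hs : ((s : Int) + 1) = ((s + 1 : Nat) : Int) := by push_cast; ring
    have hlen : (s + 1) + t.length = n := by simpa [Nat.add_assoc, Nat.add_comm 1] using hn
    simp only [List.foldl_cons, hs, ih (s + 1) _ hlen, pvVal]
    have hexp : n - 1 - ((s : Int)).toNat = t.length := by
      simp only [Int.toNat_natCast]; omega
    rw [hexp]
    unfold dval
    ring

-- ===== VERDICT (by name: the statement is the Claim_ definition above) =====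
theorem ptn_spec : Claim_equal_ptn := by
  intro text _ hpre
  unfold Spec_ptn ptn ptn_alt
  rw [ptn_fold_eq text.toList (List.all_eq_true.mp hpre) 0]
  have := ptn_alt_fold_eq text.toList.length text.toList 0 0 (by simp)
  simp only [Nat.cast_zero, zero_add, show text.toList.length = text.length from rfl] at this
  simpa using this.symm
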